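-- pv_equiv track=rewrite | github.com/bssrdf/pyleet | B/BitwiseORofAllSubsequenceSums.py | subsequenceSumOr2
-- ===== SOURCE A (Python) =====
-- from typing import List
--
-- def subsequenceSumOr2(nums: List[int]) -> int:
--     '''
--     我们先用数组cnt统计每一位上1的个数, 然后从低位到高位,如果该位上1的个数大于0,
--     则将该位所表示的数加入到答案中。然后判断是否可以进位，是则累加到下一位。
--
--     时间复杂度O(nlogM),其中n和M分别为数组长度和数组中元素的最大值。
--     '''
--     cnt = [0] * 64
--     ans = 0
--     for v in nums:
--         for i in range(31):
--             if (v >> i) & 1: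
--                 cnt[i] += 1
--     for i in range(63):
--         if cnt[i]:
--             ans |= 1 << i
--         cnt[i + 1] += cnt[i] // 2
--     return ans
-- ===== SOURCE B (Python) =====
-- from typing import List
--
-- def subsequenceSumOr2(nums: List[int]) -> int:
--     # Per-bit threshold test: bit i of the answer is set iff the sum of the
--     # inputs reduced mod 2**(i+1) (after reducing each value mod 2**31, which
--     # is the window of bits the task reads) reaches 2**i.
--     ts = [v % (1 << 31) for v in nums]
--     ans = 0
--     for i in range(63):
--         s = sum(t % (1 << (i + 1)) for t in ts)
--         if s >= 1 << i:
--             ans += 1 << i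
--     return ans
-- ===== Notes on version B (the rewrite author's own statement) =====
-- stated objective: alternative
-- what changed: Replaces A's 64-slot per-bit counter array with carry propagation by a direct per-bit threshold test: bit i of the answer is set iff the sum of the inputs reduced mod 2**31 and then mod 2**(i+1) reaches 2**i.
import Mathlib
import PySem

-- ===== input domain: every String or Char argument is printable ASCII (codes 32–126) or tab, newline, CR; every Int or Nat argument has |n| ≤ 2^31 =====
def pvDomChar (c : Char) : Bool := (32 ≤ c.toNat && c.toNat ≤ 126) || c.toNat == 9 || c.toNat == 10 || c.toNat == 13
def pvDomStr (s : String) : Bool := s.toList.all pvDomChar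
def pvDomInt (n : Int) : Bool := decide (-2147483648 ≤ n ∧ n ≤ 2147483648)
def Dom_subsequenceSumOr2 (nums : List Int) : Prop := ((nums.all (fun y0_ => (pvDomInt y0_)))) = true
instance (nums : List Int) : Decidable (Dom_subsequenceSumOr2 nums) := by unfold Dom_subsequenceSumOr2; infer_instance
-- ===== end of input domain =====

-- B replaces A's per-element bit-count array and carry-propagation pass by a direct
-- per-bit threshold test on masked running sums (alternative decomposition, same linear cost).

-- ===== PORT A =====
def subsequenceSumOr2 (nums : List Int) : Int :=
  let cnt : List Int := List.replicate 64 0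
  let cnt := nums.foldl
    (fun cnt v => (List.range 31).foldl
      (fun cnt i => if Int.land (v >>> i) 1 ≠ 0 then cnt.set i (cnt.getD i 0 + 1) else cnt)
      cnt) cnt
  let r := (List.range 63).foldl
    (fun (p : Int × List Int) i =>
      let ans := if p.2.getD i 0 ≠ 0 then Int.lor p.1 ((1:Int) <<< i) else p.1
      (ans, p.2.set (i+1) (p.2.getD (i+1) 0 + PySem.Int.floordiv (p.2.getD i 0) 2)))
    ((0 : Int), cnt)
  r.1

-- ===== PORT B =====
def subsequenceSumOr2_alt (nums : List Int) : Int :=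
  let ts := nums.map (fun v => PySem.Int.mod v ((1:Int) <<< (31:Nat)))
  (List.range 63).foldl
    (fun (ans : Int) (i : Nat) =>
      let s := (ts.map (fun t => PySem.Int.mod t ((1:Int) <<< (i+1)))).sum
      if s ≥ (1:Int) <<< i then ans + (1:Int) <<< i else ans) 0


-- ===== PRECONDITION & SPEC =====
def Spec_subsequenceSumOr2 (nums : List Int) (out : Int) : Prop := out = subsequenceSumOr2_alt nums
instance (nums : List Int) (out : Int) : Decidable (Spec_subsequenceSumOr2 nums out) := by unfold Spec_subsequenceSumOr2; infer_instance

-- ===== CLAIM (what is proved, stated in full; the proofs are below) =====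
def Claim_equal_subsequenceSumOr2 : Prop := ∀ (nums : List Int), Dom_subsequenceSumOr2 nums → Spec_subsequenceSumOr2 nums (subsequenceSumOr2 nums)

-- ===== LEMMAS AND PROOFS =====
theorem pv_ldiff_one (m : Nat) : Nat.ldiff 1 m = 1 - m % 2 := by
  rcases Nat.mod_two_eq_zero_or_one m with h | h <;> rw [h]
  · apply Nat.eq_of_testBit_eq
    intro k
    rw [Nat.testBit_ldiff]
    cases k with
    | zero => simp [Nat.testBit_zero, h]
    | succ k => simp [Nat.testBit_succ]
  · apply Nat.eq_of_testBit_eq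
    intro k
    rw [Nat.testBit_ldiff]
    cases k with
    | zero => simp [Nat.testBit_zero, h]
    | succ k => simp [Nat.testBit_succ]

theorem pv_land_one (x : Int) : Int.land x 1 = x % 2 := by
  cases x with
  | ofNat m =>
    show ((m &&& 1 : Nat) : Int) = _
    rw [Nat.and_one_is_mod, Int.ofNat_eq_natCast]
    omega
  | negSucc m =>
    show ((Nat.ldiff 1 m : Nat) : Int) = _
    rw [pv_ldiff_one, Int.negSucc_eq]
    rcases Nat.mod_two_eq_zero_or_one m with h | h <;> omega


theorem pv_step (v : Int) (k : Nat) (hk : k < 31) :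
    v % 2^31 % 2^(k+1) = v % 2^31 % 2^k + 2^k * ((v / 2^k) % 2) := by
  have hdvd : (2:Int)^k ∣ 2^31 := pow_dvd_pow 2 (by omega)
  have hdvd1 : (2:Int)^(k+1) ∣ 2^31 := pow_dvd_pow 2 (by omega)
  rw [Int.emod_emod_of_dvd _ hdvd, Int.emod_emod_of_dvd _ hdvd1]
  have hP : (0:Int) < 2^k := by positivity
  have hr0 : 0 ≤ v % 2^k := Int.emod_nonneg _ (by positivity)
  have hr1 : v % 2^k < 2^k := Int.emod_lt_of_pos _ hP
  have hv : 2^k * (v / 2^k) + v % 2^k = v := Int.ediv_add_emod v (2^k)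
  have h2 : (0:Int) ≤ v / 2^k % 2 := Int.emod_nonneg _ (by norm_num)
  have h3 : v / 2^k % 2 < 2 := Int.emod_lt_of_pos _ (by norm_num)
  calc v % 2^(k+1) = (2^k * (v / 2^k) + v % 2^k) % 2^(k+1) := by rw [hv]
    _ = (2^k * (v / 2^k) % 2^(k+1) + v % 2^k) % 2^(k+1) := by rw [Int.emod_add_emod]
    _ = (2^k * (v / 2^k % 2) + v % 2^k) % 2^(k+1) := by
          rw [pow_succ, Int.mul_emod_mul_of_pos _ _ hP]
    _ = 2^k * (v / 2^k % 2) + v % 2^k := by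
          apply Int.emod_eq_of_lt (by positivity)
          rw [pow_succ]
          nlinarith
    _ = v % 2^k + 2^k * (v / 2^k % 2) := by ring

def pvBitCnt (nums : List Int) (j : Nat) : Int :=
  if j < 31 then ((nums.countP (fun v : Int => decide (Int.land (v >>> j) 1 ≠ 0)) : Nat) : Int) else 0

def pvS (nums : List Int) (k : Nat) : Int :=
  (nums.map (fun v => v % 2^31 % 2^k)).sum

theorem pv_elt_step (v : Int) (k : Nat) :
    v % 2^31 % 2^(k+1) = v % 2^31 % 2^k +
      (if k < 31 ∧ Int.land (v >>> k) 1 ≠ 0 then 2^k else 0) := by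
  by_cases hk : k < 31
  · have hsr : v >>> k = v / 2^k := by rw [Int.shiftRight_eq_div_pow]; norm_cast
    rw [pv_step v k hk, pv_land_one, hsr]
    have h2 : (0:Int) ≤ v / 2^k % 2 := Int.emod_nonneg _ (by norm_num)
    have h3 : v / 2^k % 2 < 2 := Int.emod_lt_of_pos _ (by norm_num)
    rcases (by omega : v / 2^k % 2 = 0 ∨ v / 2^k % 2 = 1) with h | h <;>
      rw [h] <;> simp [hk]
  · have h31 : (2:Int)^31 ≤ 2^k := pow_le_pow_right₀ (by norm_num) (by omega)
    have hr0 : 0 ≤ v % 2^31 := Int.emod_nonneg _ (by positivity)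
    have hr1 : v % 2^31 < 2^31 := Int.emod_lt_of_pos _ (by positivity)
    have e1 : v % 2^31 % 2^(k+1) = v % 2^31 := by
      apply Int.emod_eq_of_lt hr0
      calc v % 2^31 < 2^31 := hr1
        _ ≤ 2^k := h31
        _ ≤ 2^(k+1) := pow_le_pow_right₀ (by norm_num) (by omega)
    have e2 : v % 2^31 % 2^k = v % 2^31 := Int.emod_eq_of_lt hr0 (lt_of_lt_of_le hr1 h31)
    rw [e1, e2, if_neg (fun h => hk h.1), add_zero]

theorem pvS_succ (nums : List Int) (k : Nat) :
    pvS nums (k+1) = pvS nums k + 2^k * pvBitCnt nums k := by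
  induction nums with
  | nil => simp [pvS, pvBitCnt]
  | cons v vs ih =>
    simp only [pvS, List.map_cons, List.sum_cons] at *
    rw [ih, pv_elt_step v k]
    unfold pvBitCnt
    by_cases hk : k < 31
    · rw [List.countP_cons]
      by_cases hb : Int.land (v >>> k) 1 ≠ 0
      · rw [if_pos ⟨hk, hb⟩, if_pos hk, if_pos hk, if_pos (by simpa using hb)]
        push_cast
        ring
      · rw [if_neg (fun h => hb h.2), if_pos hk, if_pos hk, if_neg (by simpa using hb)]
        push_cast
        ring
    · rw [if_neg (fun h => hk h.1), if_neg hk, if_neg hk]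
      ring

theorem pvS_nonneg (nums : List Int) (k : Nat) : 0 ≤ pvS nums k := by
  unfold pvS
  apply List.sum_nonneg
  intro x hx
  simp only [List.mem_map] at hx
  obtain ⟨v, -, rfl⟩ := hx
  exact Int.emod_nonneg _ (by positivity)

theorem pv_getD_set_ne (l : List Int) (i j : Nat) (a d : Int) (h : i ≠ j) : (l.set i a).getD j d = l.getD j d := by
  simp [List.getD_eq_getElem?_getD, List.getElem?_set_ne h]
theorem pv_getD_set_self (l : List Int) (i : Nat) (a d : Int) (h : i < l.length) : (l.set i a).getD i d = a := by
  simp [List.getD_eq_getElem?_getD, List.getElem?_set_self h]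
theorem pv_getD_replicate (n j : Nat) (d : Int) : (List.replicate n (0:Int)).getD j d = if j < n then 0 else d := by
  by_cases h : j < n <;> simp [List.getD_eq_getElem?_getD, h]

def pvGbit (v : Int) (j : Nat) : Int := if Int.land (v >>> j) 1 ≠ 0 then 1 else 0

theorem pv_inner_loop (v : Int) (cnt : List Int) (n : Nat) (h : cnt.length = 64) (hn : n ≤ 64) :
    ((List.range n).foldl
      (fun (cnt : List Int) (i : Nat) => if Int.land (v >>> i) 1 ≠ 0 then cnt.set i (cnt.getD i 0 + 1) else cnt) cnt).length = 64 ∧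
    ∀ j, ((List.range n).foldl
      (fun (cnt : List Int) (i : Nat) => if Int.land (v >>> i) 1 ≠ 0 then cnt.set i (cnt.getD i 0 + 1) else cnt) cnt).getD j 0
      = cnt.getD j 0 + (if j < n then pvGbit v j else 0) := by
  induction n with
  | zero => exact ⟨h, fun j => by simp⟩
  | succ n ih =>
    obtain ⟨hl, hg⟩ := ih (by omega)
    rw [List.range_succ, List.foldl_append, List.foldl_cons, List.foldl_nil]
    set L := (List.range n).foldl
      (fun (cnt : List Int) (i : Nat) => if Int.land (v >>> i) 1 ≠ 0 then cnt.set i (cnt.getD i 0 + 1) else cnt) cnt with hL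
    by_cases hb : Int.land (v >>> n) 1 ≠ 0
    · rw [if_pos hb]
      refine ⟨by rw [List.length_set, hl], fun j => ?_⟩
      by_cases hj : j = n
      · subst hj
        rw [pv_getD_set_self _ _ _ _ (by omega), hg j]
        simp only [pvGbit, if_pos hb]
        split_ifs <;> omega
      · rw [pv_getD_set_ne _ _ _ _ _ (fun e => hj e.symm), hg j]
        split_ifs <;> omega
    · rw [if_neg hb]
      refine ⟨hl, fun j => ?_⟩
      rw [hg j]
      by_cases hj : j = n
      · subst hj
        simp only [pvGbit, if_neg hb]
        split_ifs <;> omega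
      · split_ifs <;> omega

theorem pv_outer_loop (nums : List Int) (cnt : List Int) (h : cnt.length = 64) :
    (nums.foldl
      (fun (cnt : List Int) (v : Int) => (List.range 31).foldl
        (fun (cnt : List Int) (i : Nat) => if Int.land (v >>> i) 1 ≠ 0 then cnt.set i (cnt.getD i 0 + 1) else cnt) cnt) cnt).length = 64 ∧
    ∀ j, (nums.foldl
      (fun (cnt : List Int) (v : Int) => (List.range 31).foldl
        (fun (cnt : List Int) (i : Nat) => if Int.land (v >>> i) 1 ≠ 0 then cnt.set i (cnt.getD i 0 + 1) else cnt) cnt) cnt).getD j 0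
      = cnt.getD j 0 + (if j < 31 then (nums.map (fun v => pvGbit v j)).sum else 0) := by
  induction nums generalizing cnt with
  | nil => exact ⟨h, fun j => by simp⟩
  | cons v vs ih =>
    rw [List.foldl_cons]
    obtain ⟨hl1, hg1⟩ := pv_inner_loop v cnt 31 h (by omega)
    obtain ⟨hl2, hg2⟩ := ih _ hl1
    refine ⟨hl2, fun j => ?_⟩
    rw [hg2 j, hg1 j, List.map_cons, List.sum_cons]
    split_ifs <;> omega

theorem pv_cnt_eq (nums : List Int) (j : Nat) :
    pvBitCnt nums j = if j < 31 then (nums.map (fun v => pvGbit v j)).sum else 0 := by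
  unfold pvBitCnt
  by_cases hj : j < 31
  · rw [if_pos hj, if_pos hj]
    induction nums with
    | nil => simp
    | cons v vs ih =>
      rw [List.countP_cons, List.map_cons, List.sum_cons, Nat.cast_add, ih]
      by_cases hb : Int.land (v >>> j) 1 ≠ 0
      · simp [pvGbit, hb, add_comm]
      · simp [pvGbit, hb]
  · rw [if_neg hj, if_neg hj]

def pvB (nums : List Int) (n : Nat) : Nat :=
  (List.range n).foldl (fun a i => if 2^i ≤ pvS nums (i+1) then a + 2^i else a) 0

theorem pvB_succ (nums : List Int) (n : Nat) :
    pvB nums (n+1) = pvB nums n + if 2^n ≤ pvS nums (n+1) then 2^n else 0 := by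
  unfold pvB
  rw [List.range_succ, List.foldl_append, List.foldl_cons, List.foldl_nil]
  split_ifs <;> simp

theorem pvB_lt (nums : List Int) (n : Nat) : pvB nums n < 2^n := by
  induction n with
  | zero => simp [pvB]
  | succ n ih =>
    rw [pvB_succ]
    have : (2:Nat)^(n+1) = 2^n + 2^n := by ring
    split_ifs <;> omega

theorem pv_lor_pow (a : Nat) (n : Nat) (h : a < 2^n) :
    Int.lor (a : Int) ((1:Int) <<< n) = ((a + 2^n : Nat) : Int) := by
  have h1 : (1:Int) <<< n = ((2^n : Nat) : Int) := by
    rw [Int.shiftLeft_eq, one_mul]; push_cast; ring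
  rw [h1]
  have h2 : Int.lor ((a : Nat) : Int) ((2^n : Nat) : Int) = (((a ||| 2^n : Nat)) : Int) := rfl
  rw [h2]
  have h3 := Nat.two_pow_add_eq_or_of_lt h 1
  rw [Nat.mul_one] at h3
  rw [Nat.lor_comm] at h3
  rw [← h3, Nat.add_comm]

theorem pv_second_loop (nums : List Int) (cnt0 : List Int)
    (hlen : cnt0.length = 64) (hcnt : ∀ j, cnt0.getD j 0 = pvBitCnt nums j)
    (n : Nat) (hn : n ≤ 63) :
    (((List.range n).foldl
      (fun (p : Int × List Int) (i : Nat) =>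
        let ans := if p.2.getD i 0 ≠ 0 then Int.lor p.1 ((1:Int) <<< i) else p.1
        (ans, p.2.set (i+1) (p.2.getD (i+1) 0 + PySem.Int.floordiv (p.2.getD i 0) 2)))
      ((0 : Int), cnt0)).1 = ((pvB nums n : Nat) : Int)) ∧
    ((List.range n).foldl
      (fun (p : Int × List Int) (i : Nat) =>
        let ans := if p.2.getD i 0 ≠ 0 then Int.lor p.1 ((1:Int) <<< i) else p.1
        (ans, p.2.set (i+1) (p.2.getD (i+1) 0 + PySem.Int.floordiv (p.2.getD i 0) 2)))
      ((0 : Int), cnt0)).2.length = 64 ∧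
    ((List.range n).foldl
      (fun (p : Int × List Int) (i : Nat) =>
        let ans := if p.2.getD i 0 ≠ 0 then Int.lor p.1 ((1:Int) <<< i) else p.1
        (ans, p.2.set (i+1) (p.2.getD (i+1) 0 + PySem.Int.floordiv (p.2.getD i 0) 2)))
      ((0 : Int), cnt0)).2.getD n 0 = pvS nums (n+1) / 2^n ∧
    ∀ j, n < j → ((List.range n).foldl
      (fun (p : Int × List Int) (i : Nat) =>
        let ans := if p.2.getD i 0 ≠ 0 then Int.lor p.1 ((1:Int) <<< i) else p.1
        (ans, p.2.set (i+1) (p.2.getD (i+1) 0 + PySem.Int.floordiv (p.2.getD i 0) 2)))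
      ((0 : Int), cnt0)).2.getD j 0 = pvBitCnt nums j := by
  induction n with
  | zero =>
    refine ⟨by simp [pvB], hlen, ?_, fun j _ => hcnt j⟩
    rw [List.range_zero, List.foldl_nil]
    have h0 : pvS nums 0 = 0 := by
      simp [pvS]
    have h1 : pvS nums 1 = pvBitCnt nums 0 := by
      rw [pvS_succ, h0]; ring
    rw [h1, pow_zero, Int.ediv_one]
    exact hcnt 0
  | succ n ih =>
    obtain ⟨ha, hl, hq, hrest⟩ := ih (by omega)
    rw [List.range_succ, List.foldl_append, List.foldl_cons, List.foldl_nil]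
    set st := ((List.range n).foldl
      (fun (p : Int × List Int) (i : Nat) =>
        let ans := if p.2.getD i 0 ≠ 0 then Int.lor p.1 ((1:Int) <<< i) else p.1
        (ans, p.2.set (i+1) (p.2.getD (i+1) 0 + PySem.Int.floordiv (p.2.getD i 0) 2)))
      ((0 : Int), cnt0)) with hst
    have hq0 : 0 ≤ pvS nums (n+1) / 2^n := Int.ediv_nonneg (pvS_nonneg _ _) (by positivity)
    have hguard : (st.2.getD n 0 ≠ 0) ↔ (2^n ≤ pvS nums (n+1)) := by
      rw [hq]
      constructor
      · intro hne
        have h1 : 1 ≤ pvS nums (n+1) / 2^n := by omega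
        calc (2:Int)^n = 1 * 2^n := by ring
          _ ≤ pvS nums (n+1) := (Int.le_ediv_iff_mul_le (by positivity)).mp h1
      · intro hge
        have h1 : 1 ≤ pvS nums (n+1) / 2^n := by
          rw [Int.le_ediv_iff_mul_le (by positivity : (0:Int) < 2^n), one_mul]
          exact hge
        omega
    have hfst : (if st.2.getD n 0 ≠ 0 then Int.lor st.1 ((1:Int) <<< n) else st.1)
        = ((pvB nums (n+1) : Nat) : Int) := by
      rw [pvB_succ]
      by_cases hg : 2^n ≤ pvS nums (n+1)
      · rw [if_pos (hguard.mpr hg), ha, pv_lor_pow _ _ (pvB_lt nums n), if_pos hg]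
      · rw [if_neg (fun hh => hg (hguard.mp hh)), ha, if_neg hg, Nat.add_zero]
    have hnewval : st.2.getD (n+1) 0 + PySem.Int.floordiv (st.2.getD n 0) 2
        = pvS nums (n+2) / 2^(n+1) := by
      rw [hrest (n+1) (by omega), hq, PySem.Int.floordiv_eq_ediv_of_pos (by norm_num)]
      have e1 : pvS nums (n+2) = pvS nums (n+1) + 2^(n+1) * pvBitCnt nums (n+1) :=
        pvS_succ nums (n+1)
      rw [e1, Int.add_mul_ediv_left _ _ (by positivity : ((2:Int)^(n+1)) ≠ 0)]
      rw [pow_succ, ← Int.ediv_ediv_of_nonneg (by positivity : (0:Int) ≤ 2^n)]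
      ring
    refine ⟨hfst, by rw [List.length_set, hl], ?_, fun j hj => ?_⟩
    · rw [pv_getD_set_self _ _ _ _ (by omega), hnewval]
    · rw [pv_getD_set_ne _ _ _ _ _ (by omega), hrest j (by omega)]

theorem pv_shift_cast (n : Nat) : (1:Int) <<< n = ((2^n : Nat) : Int) := by
  rw [Int.shiftLeft_eq, one_mul]; push_cast; ring

theorem pv_alt_eq (nums : List Int) :
    subsequenceSumOr2_alt nums = ((pvB nums 63 : Nat) : Int) := by
  have hs : ∀ i : Nat, ((nums.map (fun v => PySem.Int.mod v ((1:Int) <<< (31:Nat)))).map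
      (fun t => PySem.Int.mod t ((1:Int) <<< (i+1)))).sum = pvS nums (i+1) := by
    intro i
    rw [List.map_map]
    unfold pvS
    apply congrArg List.sum
    apply List.map_congr_left
    intro v _
    show PySem.Int.mod (PySem.Int.mod v ((1:Int) <<< (31:Nat))) ((1:Int) <<< (i+1)) = _
    have p1 : (0:Int) < (1:Int) <<< (31:Nat) := by decide
    have p2 : (0:Int) < (1:Int) <<< (i+1) := by
      rw [pv_shift_cast]; positivity
    rw [PySem.Int.mod_eq_emod_of_pos p1, PySem.Int.mod_eq_emod_of_pos p2,
        pv_shift_cast, pv_shift_cast]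
    push_cast
    norm_num
  have key : ∀ n : Nat, (List.range n).foldl
      (fun (ans : Int) (i : Nat) =>
        let s := ((nums.map (fun v => PySem.Int.mod v ((1:Int) <<< (31:Nat)))).map
          (fun t => PySem.Int.mod t ((1:Int) <<< (i+1)))).sum
        if s ≥ (1:Int) <<< i then ans + (1:Int) <<< i else ans) 0 = ((pvB nums n : Nat) : Int) := by
    intro n
    induction n with
    | zero => simp [pvB]
    | succ n ih =>
      rw [List.range_succ, List.foldl_append, List.foldl_cons, List.foldl_nil, ih, pvB_succ]
      show (if _ ≥ _ then _ else _) = _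
      rw [hs n, pv_shift_cast]
      by_cases hg : 2^n ≤ pvS nums (n+1)
      · rw [if_pos (by push_cast; exact_mod_cast hg), if_pos hg]
        push_cast; ring
      · rw [if_neg (by push_cast; exact_mod_cast hg), if_neg hg, Nat.add_zero]
  exact key 63

theorem pv_main (nums : List Int) : subsequenceSumOr2 nums = subsequenceSumOr2_alt nums := by
  rw [pv_alt_eq]
  unfold subsequenceSumOr2
  obtain ⟨hl, hg⟩ := pv_outer_loop nums (List.replicate 64 0) (by simp)
  have hcnt : ∀ j, ((nums.foldl
      (fun (cnt : List Int) (v : Int) => (List.range 31).foldl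
        (fun (cnt : List Int) (i : Nat) => if Int.land (v >>> i) 1 ≠ 0 then cnt.set i (cnt.getD i 0 + 1) else cnt) cnt)
      (List.replicate 64 0))).getD j 0 = pvBitCnt nums j := by
    intro j
    rw [hg j, pv_getD_replicate, pv_cnt_eq]
    split_ifs <;> simp
  exact (pv_second_loop nums _ hl hcnt 63 (by omega)).1

-- ===== VERDICT (by name: the statement is the Claim_ definition above) =====
theorem subsequenceSumOr2_spec : Claim_equal_subsequenceSumOr2 := by
  intro nums _
  unfold Spec_subsequenceSumOr2
  exact pv_main nums
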